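-- pv_equiv track=rewrite | github.com/stgleb/algorithms-and-datastructures | arrays/matrix_spiral_order.py | cirlce
-- ===== SOURCE A (Python) =====
-- def cirlce(a, n, offset):
--     result = []
--     # we have odd dimension and we are at the center
--     if offset == n - offset - 1:
--         result.append(a[offset][offset])
--         return result
--
--     # move right
--     for i in range(n - offset * 2):
--         result.append(a[offset][offset + i])
--     # move down
--     for i in range(n - offset * 2 - 1):
--         result.append(a[offset + i + 1][n - offset - 1])
--
--     # move left
--     for i in range(n - offset * 2 - 1):
--         result.append(a[n - offset - 1][n - offset - 2 - i])
--     # move up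
--     for i in range(n - offset * 2 - 2):
--         result.append(a[n - offset - 2 - i][offset])
--     return result
-- ===== SOURCE B (Python) =====
-- def cirlce(a, n, offset):
--     # length-1 center ring
--     if offset == n - offset - 1:
--         return [a[offset][offset]]
--     deltas = [(0, 1), (1, 0), (0, -1), (-1, 0)]
--     lo, hi = offset, n - offset - 1
--     total = 4 * (n - 2 * offset) - 4
--     r, c, d = offset, offset, 0
--     result = []
--     for _ in range(total):
--         result.append(a[r][c])
--         nr, nc = r + deltas[d][0], c + deltas[d][1]
--         if not (lo <= nr <= hi and lo <= nc <= hi):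
--             d = (d + 1) % 4
--             nr, nc = r + deltas[d][0], c + deltas[d][1]
--         r, c = nr, nc
--     return result
-- ===== Notes on version B (the rewrite author's own statement) =====
-- stated objective: alternative
-- what changed: Replaces the four separately index-computed for-loops (right/down/left/up) by a single position/direction state machine: one loop of 4*(n-2*offset)-4 steps that appends a[r][c] and turns the direction delta whenever the next step would leave the ring bounds.
import Mathlib
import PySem

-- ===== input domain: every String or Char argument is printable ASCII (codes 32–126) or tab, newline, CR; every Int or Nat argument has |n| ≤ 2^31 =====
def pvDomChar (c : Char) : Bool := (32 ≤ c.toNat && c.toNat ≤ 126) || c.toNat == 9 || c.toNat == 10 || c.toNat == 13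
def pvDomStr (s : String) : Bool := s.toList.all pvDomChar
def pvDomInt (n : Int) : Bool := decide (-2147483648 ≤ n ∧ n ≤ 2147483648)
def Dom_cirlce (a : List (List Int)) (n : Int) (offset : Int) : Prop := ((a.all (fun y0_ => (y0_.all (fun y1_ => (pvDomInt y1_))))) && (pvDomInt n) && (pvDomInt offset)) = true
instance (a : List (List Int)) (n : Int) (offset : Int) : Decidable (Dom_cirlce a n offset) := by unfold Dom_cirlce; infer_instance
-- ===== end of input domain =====

-- B replaces A's four index-computed loops by a single position/direction walk around the ring; same cost, different decomposition.


-- ===== PORT A =====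
-- a[i][j]; in-range under Pre_ (the 0/[] defaults are never consulted there)
def pvGet2 (a : List (List Int)) (i j : Int) : Int :=
  PySem.List.pyGetD (PySem.List.pyGetD a i []) j 0

def cirlce (a : List (List Int)) (n : Int) (offset : Int) : List Int :=
  if offset = n - offset - 1 then
    [pvGet2 a offset offset]
  else
    -- move right
    let result := (PySem.List.pyRange 0 (n - offset * 2) 1).foldl
      (fun res i => res ++ [pvGet2 a offset (offset + i)]) []
    -- move down
    let result := (PySem.List.pyRange 0 (n - offset * 2 - 1) 1).foldl
      (fun res i => res ++ [pvGet2 a (offset + i + 1) (n - offset - 1)]) result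
    -- move left
    let result := (PySem.List.pyRange 0 (n - offset * 2 - 1) 1).foldl
      (fun res i => res ++ [pvGet2 a (n - offset - 1) (n - offset - 2 - i)]) result
    -- move up
    let result := (PySem.List.pyRange 0 (n - offset * 2 - 2) 1).foldl
      (fun res i => res ++ [pvGet2 a (n - offset - 2 - i) offset]) result
    result

-- ===== PORT B =====
def pvDeltas : List (Int × Int) := [(0, 1), (1, 0), (0, -1), (-1, 0)]

def pvDelta (d : Int) : Int × Int := PySem.List.pyGetD pvDeltas d (0, 0)

-- the 'for _ in range(total)' loop of Source B; fuel = number of remaining steps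
def pvWalk (a : List (List Int)) (lo hi : Int) :
    Nat → Int → Int → Int → List Int → List Int
  | 0, _, _, _, res => res
  | k+1, r, c, d, res =>
    let res' := res ++ [pvGet2 a r c]
    let nr := r + (pvDelta d).1
    let nc := c + (pvDelta d).2
    if lo ≤ nr ∧ nr ≤ hi ∧ lo ≤ nc ∧ nc ≤ hi then
      pvWalk a lo hi k nr nc d res'
    else
      let d' := PySem.Int.mod (d + 1) 4
      pvWalk a lo hi k (r + (pvDelta d').1) (c + (pvDelta d').2) d' res'

def cirlce_alt (a : List (List Int)) (n : Int) (offset : Int) : List Int :=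
  if offset = n - offset - 1 then
    [pvGet2 a offset offset]
  else
    pvWalk a offset (n - offset - 1) (4 * (n - 2 * offset) - 4).toNat offset offset 0 []

-- ===== PRECONDITION & SPEC =====
-- Pre_ = exactly the inputs on which Python A returns (no IndexError): either the ring window
-- [offset, n-offset-1] is empty, or every window index is a valid Python row index and, for every
-- row the window touches (directly or via negative-index wraparound), a valid column index too.
def Pre_cirlce (a : List (List Int)) (n : Int) (offset : Int) : Prop :=
  n - 2 * offset ≤ 0 ∨
    (-(a.length : Int) ≤ offset ∧ n - offset - 1 < (a.length : Int) ∧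
     ∀ rk ∈ a.zipIdx,
       ((offset ≤ (rk.2 : Int) ∧ (rk.2 : Int) ≤ n - offset - 1) ∨
        (offset ≤ (rk.2 : Int) - a.length ∧ (rk.2 : Int) - (a.length : Int) ≤ n - offset - 1)) →
       (-(rk.1.length : Int) ≤ offset ∧ n - offset - 1 < (rk.1.length : Int)))
instance (a : List (List Int)) (n : Int) (offset : Int) : Decidable (Pre_cirlce a n offset) := by
  unfold Pre_cirlce; infer_instance

def pvWitness_cirlce : List (List Int) × Int × Int := ([[1, 2], [3, 4]], 2, 0)

def Spec_cirlce (a : List (List Int)) (n : Int) (offset : Int) (out : List Int) : Prop := out = cirlce_alt a n offset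
instance (a : List (List Int)) (n : Int) (offset : Int) (out : List Int) : Decidable (Spec_cirlce a n offset out) := by unfold Spec_cirlce; infer_instance

-- ===== CLAIM (what is proved, stated in full; the proofs are below) =====
def Claim_equal_cirlce : Prop := ∀ (a : List (List Int)) (n : Int) (offset : Int), Dom_cirlce a n offset → Pre_cirlce a n offset → Spec_cirlce a n offset (cirlce a n offset)

-- ===== LEMMAS AND PROOFS =====

lemma map_range_shift_add (f : Int → Int) (c : Int) (k : Nat) :
    (List.range (k+1)).map (fun i : Nat => f (c + i)) =
      f c :: (List.range k).map (fun i : Nat => f (c + 1 + i)) := by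
  simp [List.range_succ_eq_map, List.map_map]
  intro i _
  congr 1
  ring

lemma map_range_shift_sub (f : Int → Int) (c : Int) (k : Nat) :
    (List.range (k+1)).map (fun i : Nat => f (c - i)) =
      f c :: (List.range k).map (fun i : Nat => f (c - 1 - i)) := by
  simp [List.range_succ_eq_map, List.map_map]
  intro i _
  congr 1
  ring

lemma pvDelta_zero : pvDelta 0 = (0, 1) := rfl
lemma pvDelta_one : pvDelta 1 = (1, 0) := rfl
lemma pvDelta_two : pvDelta 2 = (0, -1) := rfl
lemma pvDelta_three : pvDelta 3 = (-1, 0) := rfl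
lemma pvMod_one : PySem.Int.mod (0 + 1) 4 = 1 := by decide
lemma pvMod_two : PySem.Int.mod (1 + 1) 4 = 2 := by decide
lemma pvMod_three : PySem.Int.mod (2 + 1) 4 = 3 := by decide

lemma leg_right (a : List (List Int)) (lo hi : Int) :
    ∀ (j rest : Nat) (r c : Int) (res : List Int),
      c + j = hi → lo ≤ c → lo ≤ r → r < hi →
      pvWalk a lo hi (j + 1 + rest) r c 0 res =
        pvWalk a lo hi rest (r+1) hi 1
          (res ++ (List.range (j+1)).map (fun i : Nat => pvGet2 a r (c + i))) := by
  intro j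
  induction j with
  | zero =>
    intro rest r c res hc hlc hlr hrh
    have hch : c = hi := by simpa using hc
    subst hch
    rw [show 0 + 1 + rest = rest + 1 from by omega]
    simp only [pvWalk, pvDelta_zero, pvMod_one, pvDelta_one]
    rw [if_neg (by omega)]
    norm_num
  | succ j ih =>
    intro rest r c res hc hlc hlr hrh
    rw [show (j+1) + 1 + rest = (j + 1 + rest) + 1 from by omega]
    simp only [pvWalk, pvDelta_zero]
    rw [if_pos (by constructor <;> [omega; refine ⟨by omega, by omega, by omega⟩])]
    rw [show r + 0 = r from by omega]
    rw [ih rest r (c+1) (res ++ [pvGet2 a r c]) (by omega) (by omega) hlr hrh]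
    congr 1
    rw [map_range_shift_add (fun x => pvGet2 a r x) c (j+1)]
    simp

lemma leg_down (a : List (List Int)) (lo hi : Int) :
    ∀ (j rest : Nat) (r c : Int) (res : List Int),
      r + j = hi → lo ≤ r → lo < c → c ≤ hi →
      pvWalk a lo hi (j + 1 + rest) r c 1 res =
        pvWalk a lo hi rest hi (c-1) 2
          (res ++ (List.range (j+1)).map (fun i : Nat => pvGet2 a (r + i) c)) := by
  intro j
  induction j with
  | zero =>
    intro rest r c res hr hlr hlc hch
    have hrh : r = hi := by simpa using hr
    subst hrh
    rw [show 0 + 1 + rest = rest + 1 from by omega]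
    simp only [pvWalk, pvDelta_one, pvMod_two, pvDelta_two]
    rw [if_neg (by omega)]
    rw [show r + 0 = r from by ring, show c + (-1) = c - 1 from by ring]
    norm_num
  | succ j ih =>
    intro rest r c res hr hlr hlc hch
    rw [show (j+1) + 1 + rest = (j + 1 + rest) + 1 from by omega]
    simp only [pvWalk, pvDelta_one]
    rw [if_pos (by push_cast at hr; refine ⟨by omega, by omega, by omega, by omega⟩)]
    rw [show c + 0 = c from by omega]
    rw [ih rest (r+1) c (res ++ [pvGet2 a r c]) (by push_cast at hr ⊢; omega) (by omega) hlc hch]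
    congr 1
    rw [map_range_shift_add (fun x => pvGet2 a x c) r (j+1)]
    simp

lemma leg_left (a : List (List Int)) (lo hi : Int) :
    ∀ (j rest : Nat) (r c : Int) (res : List Int),
      c - j = lo → c ≤ hi → lo < r → r ≤ hi →
      pvWalk a lo hi (j + 1 + rest) r c 2 res =
        pvWalk a lo hi rest (r-1) lo 3
          (res ++ (List.range (j+1)).map (fun i : Nat => pvGet2 a r (c - i))) := by
  intro j
  induction j with
  | zero =>
    intro rest r c res hc hch hlr hrh
    have hcl : c = lo := by simpa using hc
    subst hcl
    rw [show 0 + 1 + rest = rest + 1 from by omega]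
    simp only [pvWalk, pvDelta_two, pvMod_three, pvDelta_three]
    rw [if_neg (by omega)]
    rw [show r + (-1) = r - 1 from by ring, show c + 0 = c from by ring]
    norm_num
  | succ j ih =>
    intro rest r c res hc hch hlr hrh
    rw [show (j+1) + 1 + rest = (j + 1 + rest) + 1 from by omega]
    simp only [pvWalk, pvDelta_two]
    rw [if_pos (by push_cast at hc; refine ⟨by omega, by omega, by omega, by omega⟩)]
    rw [show r + 0 = r from by omega, show c + (-1) = c - 1 from by ring]
    rw [ih rest r (c-1) (res ++ [pvGet2 a r c]) (by push_cast at hc ⊢; omega) (by omega) hlr hrh]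
    congr 1
    rw [map_range_shift_sub (fun x => pvGet2 a r x) c (j+1)]
    simp

lemma leg_up (a : List (List Int)) (lo hi : Int) (hlh : lo < hi) :
    ∀ (k : Nat) (r : Int) (res : List Int),
      lo ≤ r - k → r ≤ hi →
      pvWalk a lo hi k r lo 3 res =
        res ++ (List.range k).map (fun i : Nat => pvGet2 a (r - i) lo) := by
  intro k
  induction k with
  | zero =>
    intro r res _ _
    simp [pvWalk]
  | succ k ih =>
    intro r res hlk hrh
    push_cast at hlk
    simp only [pvWalk, pvDelta_three]
    rw [if_pos (by refine ⟨by omega, by omega, by omega, by omega⟩)]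
    rw [show r + (-1) = r - 1 from by ring, show lo + 0 = lo from by ring]
    rw [ih (r-1) (res ++ [pvGet2 a r lo]) (by omega) (by omega)]
    rw [map_range_shift_sub (fun x => pvGet2 a x lo) r (k)]
    simp

lemma walk_spiral (a : List (List Int)) (lo hi : Int) (m : Nat) (h : hi = lo + m + 1) :
    pvWalk a lo hi (4*m + 4) lo lo 0 [] =
      (List.range (m+2)).map (fun i : Nat => pvGet2 a lo (lo + i)) ++
      (List.range (m+1)).map (fun i : Nat => pvGet2 a (lo + 1 + i) hi) ++
      (List.range (m+1)).map (fun i : Nat => pvGet2 a hi (hi - 1 - i)) ++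
      (List.range m).map (fun i : Nat => pvGet2 a (hi - 1 - i) lo) := by
  rw [show 4*m + 4 = (m+1) + 1 + (3*m+2) from by omega]
  rw [leg_right a lo hi (m+1) (3*m+2) lo lo [] (by omega) le_rfl le_rfl (by omega)]
  rw [show 3*m + 2 = m + 1 + (2*m+1) from by omega]
  rw [leg_down a lo hi m (2*m+1) (lo+1) hi _ (by omega) (by omega) (by omega) le_rfl]
  rw [show 2*m + 1 = m + 1 + m from by omega]
  rw [leg_left a lo hi m m hi (hi-1) _ (by omega) (by omega) (by omega) le_rfl]
  rw [leg_up a lo hi (by omega) m (hi-1) _ (by omega) (by omega)]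
  simp [List.append_assoc]

theorem cirlce_eq (a : List (List Int)) (n offset : Int) :
    cirlce a n offset = cirlce_alt a n offset := by
  by_cases hg : offset = n - offset - 1
  · simp only [cirlce, cirlce_alt]
    rw [if_pos hg, if_pos hg]
  · rcases le_or_gt (n - 2*offset) 0 with hs0 | hs1
    · -- collapsed ring: both sides are []
      have e1 : PySem.List.pyRange 0 (n - offset * 2) 1 = [] :=
        PySem.List.pyRange_one_eq_nil (by omega)
      have e2 : PySem.List.pyRange 0 (n - offset * 2 - 1) 1 = [] :=
        PySem.List.pyRange_one_eq_nil (by omega)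
      have e3 : PySem.List.pyRange 0 (n - offset * 2 - 2) 1 = [] :=
        PySem.List.pyRange_one_eq_nil (by omega)
      have e5 : (4 * (n - 2 * offset) - 4).toNat = 0 := by omega
      simp only [cirlce, cirlce_alt]
      rw [if_neg hg, if_neg hg, e1, e2, e3, e5]
      simp [pvWalk]
    · -- real ring: n - 2*offset = m + 2
      have hs2 : 2 ≤ n - 2*offset := by omega
      set m : Nat := (n - 2*offset - 2).toNat with hm
      have hmi : (m : Int) = n - 2*offset - 2 := by omega
      have hfuel : (4 * (n - 2 * offset) - 4).toNat = 4*m + 4 := by omega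
      have hB : cirlce_alt a n offset =
          (List.range (m+2)).map (fun i : Nat => pvGet2 a offset (offset + i)) ++
          (List.range (m+1)).map (fun i : Nat => pvGet2 a (offset + 1 + i) (n - offset - 1)) ++
          (List.range (m+1)).map (fun i : Nat => pvGet2 a (n - offset - 1) (n - offset - 1 - 1 - i)) ++
          (List.range m).map (fun i : Nat => pvGet2 a (n - offset - 1 - 1 - i) offset) := by
        simp only [cirlce_alt, if_neg hg, hfuel]
        exact walk_spiral a offset (n - offset - 1) m (by omega)
      rw [hB]
      simp only [cirlce, if_neg hg,
        PySem.List.foldl_append_singleton_eq_map, List.nil_append,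
        PySem.List.pyRange_one, List.map_map, Int.sub_zero]
      have t1 : (n - offset * 2).toNat = m + 2 := by omega
      have t2 : (n - offset * 2 - 1).toNat = m + 1 := by omega
      have t3 : (n - offset * 2 - 2).toNat = m := by omega
      rw [t1, t2, t3]
      simp only [List.append_assoc]
      congr 1
      · exact List.map_congr_left (fun i _ => by simp [Function.comp])
      congr 1
      · refine List.map_congr_left (fun i _ => ?_)
        simp only [Function.comp]
        congr 1
        omega
      congr 1
      · refine List.map_congr_left (fun i _ => ?_)
        simp only [Function.comp]
        congr 1
        omega
      · refine List.map_congr_left (fun i _ => ?_)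
        simp only [Function.comp]
        congr 1
        omega

-- ===== VERDICT (by name: the statement is the Claim_ definition above) =====
theorem cirlce_spec : Claim_equal_cirlce := by
  intro a n offset _ _
  exact cirlce_eq a n offset
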